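-- pv_equiv track=rewrite | github.com/daniel-reich/turbo-robot | 5uMJmbN2uihcyEu75_19.py | weekly_salary
-- ===== SOURCE A (Python) =====
-- def weekly_salary(hours):
--   sum1 = 0
--   sum2 = 0
--   a = 0
--   ar1 = hours[:5]
--   ar2 = hours[5:]
--   for x in ar1:
--     if x <= 8:
--       sum1 += x*10
--       x += 1
--     else:
--       a = x - 8
--       sum1 += a * 15 + (x - a) * 10
--       a = 0
--       x += 1
--   for y in ar2:
--     if y <= 8:
--       sum2 += y*20
--       x += 1
--     else:
--       a = y - 8
--       sum2 += a * 30 + (y - a) * 20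
--       a = 0
--       y += 1
--   return sum2 + sum1
-- ===== SOURCE B (Python) =====
-- def weekly_salary(hours):
--     # Consume the week back-to-front with an explicit stack: pop the last day,
--     # its rate follows from how many days remain (<5 -> weekday 10, else 20).
--     stack = list(hours)
--     total = 0
--     while stack:
--         x = stack.pop()
--         rate = 10 if len(stack) < 5 else 20
--         total += x * rate + ((x - 8) * (rate // 2) if x > 8 else 0)
--     return total
-- ===== Notes on version B (the rewrite author's own statement) =====
-- stated objective: alternative
-- what changed: A iterates forward over two slices hours[:5]/hours[5:] with if/else overtime branches and dead bookkeeping variables; B consumes the week back-to-front with an explicit stack, popping the last day, deriving that day's rate from the number of days remaining, and adding a closed-form per-day contribution to an accumulator.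
import Mathlib
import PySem

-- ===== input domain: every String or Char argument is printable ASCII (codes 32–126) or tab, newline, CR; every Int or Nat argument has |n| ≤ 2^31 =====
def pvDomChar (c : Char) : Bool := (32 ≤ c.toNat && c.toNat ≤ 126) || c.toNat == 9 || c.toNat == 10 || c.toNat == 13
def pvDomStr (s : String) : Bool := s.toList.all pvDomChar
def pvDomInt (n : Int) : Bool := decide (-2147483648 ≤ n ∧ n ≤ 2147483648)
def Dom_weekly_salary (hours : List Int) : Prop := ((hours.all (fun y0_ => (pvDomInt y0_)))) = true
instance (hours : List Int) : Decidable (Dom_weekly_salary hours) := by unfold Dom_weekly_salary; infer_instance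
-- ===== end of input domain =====

-- B replaces A's two forward slice-loops (with if/else overtime branches and dead
-- bookkeeping variables) by an explicit-stack loop that pops days back-to-front,
-- deriving each day's rate from the days remaining (objective: alternative).

-- ===== PORT A =====
-- State carried through the loops is (sum, a, x): Python's a, x, y mutations are
-- transliterated even though they never affect the returned value.  The initial
-- value 0 for x stands for Python's "unbound": x is only read in the second loop,
-- which is nonempty only when the first loop ran (so x was assigned).
def weekly_salary (hours : List Int) : Int :=
  let sum1 : Int := 0
  let sum2 : Int := 0
  let a : Int := 0
  let ar1 := PySem.List.slice hours none (some 5)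
  let ar2 := PySem.List.slice hours (some 5) none
  let st1 := ar1.foldl (fun (st : Int × Int × Int) x =>
      if x ≤ 8 then (st.1 + x * 10, st.2.1, x + 1)
      else
        let a' := x - 8
        (st.1 + a' * 15 + (x - a') * 10, 0, x + 1)) (sum1, a, (0 : Int))
  let st2 := ar2.foldl (fun (st : Int × Int × Int) y =>
      if y ≤ 8 then (st.1 + y * 20, st.2.1, st.2.2 + 1)
      else
        let a' := y - 8
        (st.1 + a' * 30 + (y - a') * 20, 0, st.2.2)) (sum2, st1.2.1, st1.2.2)
  st2.1 + st1.1

-- ===== PORT B =====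
-- B's while-pop loop: stack.pop() on a nonempty list is getLast/dropLast (exact);
-- pvAltGo carries (stack, total) exactly as B's loop does.
def pvAltGo (stack : List Int) (total : Int) : Int :=
  if h : stack = [] then total
  else
    let x := stack.getLast h
    let rest := stack.dropLast
    let rate : Int := if rest.length < 5 then 10 else 20
    pvAltGo rest (total + (x * rate + (if 8 < x then (x - 8) * (PySem.Int.floordiv rate 2) else 0)))
termination_by stack.length
decreasing_by
  simp only [List.length_dropLast]
  have := List.length_pos_of_ne_nil h
  omega

def weekly_salary_alt (hours : List Int) : Int := pvAltGo hours 0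

-- ===== PRECONDITION & SPEC =====
def Spec_weekly_salary (hours : List Int) (out : Int) : Prop := out = weekly_salary_alt hours
instance (hours : List Int) (out : Int) : Decidable (Spec_weekly_salary hours out) := by unfold Spec_weekly_salary; infer_instance

-- ===== CLAIM (what is proved, stated in full; the proofs are below) =====
def Claim_equal_weekly_salary : Prop := ∀ (hours : List Int), Dom_weekly_salary hours → Spec_weekly_salary hours (weekly_salary hours)

-- ===== LEMMAS AND PROOFS =====

-- per-day contributions of A's two loops
def pvC1 (x : Int) : Int := if x ≤ 8 then x * 10 else (x - 8) * 15 + (x - (x - 8)) * 10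
def pvC2 (y : Int) : Int := if y ≤ 8 then y * 20 else (y - 8) * 30 + (y - (y - 8)) * 20

lemma loop1_fst (l : List Int) (s a x : Int) :
    (l.foldl (fun (st : Int × Int × Int) x =>
      if x ≤ 8 then (st.1 + x * 10, st.2.1, x + 1)
      else
        let a' := x - 8
        (st.1 + a' * 15 + (x - a') * 10, 0, x + 1)) (s, a, x)).1
    = s + (l.map pvC1).sum := by
  induction l generalizing s a x with
  | nil => simp
  | cons h t ih =>
    rw [List.foldl_cons]
    by_cases hc : h ≤ 8
    · rw [if_pos hc, ih]; simp [pvC1, hc]; ring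
    · rw [if_neg hc]; rw [ih]; simp [pvC1, hc]; ring

lemma loop2_fst (l : List Int) (s a x : Int) :
    (l.foldl (fun (st : Int × Int × Int) y =>
      if y ≤ 8 then (st.1 + y * 20, st.2.1, st.2.2 + 1)
      else
        let a' := y - 8
        (st.1 + a' * 30 + (y - a') * 20, 0, st.2.2)) (s, a, x)).1
    = s + (l.map pvC2).sum := by
  induction l generalizing s a x with
  | nil => simp
  | cons h t ih =>
    rw [List.foldl_cons]
    by_cases hc : h ≤ 8
    · rw [if_pos hc, ih]; simp [pvC2, hc]; ring
    · rw [if_neg hc]; rw [ih]; simp [pvC2, hc]; ring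

-- characterisation of B's stack loop: pay of take 5 at weekday rates + pay of drop 5 at weekend rates
lemma altGo_eq (l : List Int) (t : Int) :
    pvAltGo l t = t + (((l.take 5).map pvC1).sum + ((l.drop 5).map pvC2).sum) := by
  induction l using List.reverseRecOn generalizing t with
  | nil => simp [pvAltGo]
  | append_singleton l x ih =>
    rw [pvAltGo]
    have hne : l ++ [x] ≠ [] := by simp
    rw [dif_neg hne]
    simp only [List.getLast_concat, List.dropLast_concat]
    rw [ih]
    rcases lt_or_ge l.length 5 with h5 | h5
    · -- fewer than five days remain on the stack: rate 10
      rw [if_pos h5]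
      have ht : l.take 5 = l := List.take_of_length_le (by omega)
      have ht' : (l ++ [x]).take 5 = l ++ [x] := List.take_of_length_le (by simp only [List.length_append, List.length_singleton]; omega)
      have hd : l.drop 5 = [] := List.drop_eq_nil_of_le (by omega)
      have hd' : (l ++ [x]).drop 5 = [] := List.drop_eq_nil_of_le (by simp only [List.length_append, List.length_singleton]; omega)
      rw [ht, ht', hd, hd']
      simp only [List.map_nil, List.sum_nil, List.map_append, List.sum_append,
        List.map_cons, List.sum_cons]
      have hfd : PySem.Int.floordiv 10 2 = 5 := by decide
      rw [hfd]
      by_cases hx : (8 : Int) < x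
      · rw [if_pos hx]; simp [pvC1, not_le.mpr hx]; ring
      · rw [if_neg hx]; simp [pvC1, not_lt.mp hx]; ring
    · -- five or more days remain: rate 20
      rw [if_neg (by omega)]
      have ht : (l ++ [x]).take 5 = l.take 5 := List.take_append_of_le_length (by omega)
      have hd : (l ++ [x]).drop 5 = l.drop 5 ++ [x] := List.drop_append_of_le_length (by omega)
      rw [ht, hd]
      simp only [List.map_append, List.sum_append, List.map_cons, List.sum_cons,
        List.map_nil, List.sum_nil]
      have hfd : PySem.Int.floordiv 20 2 = 10 := by decide
      rw [hfd]
      by_cases hx : (8 : Int) < x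
      · rw [if_pos hx]; simp [pvC2, not_le.mpr hx]; ring
      · rw [if_neg hx]; simp [pvC2, not_lt.mp hx]; ring

-- ===== VERDICT (by name: the statement is the Claim_ definition above) =====
theorem weekly_salary_spec : Claim_equal_weekly_salary := by
  intro hours _
  show weekly_salary hours = weekly_salary_alt hours
  simp only [weekly_salary]
  rw [loop1_fst, loop2_fst, weekly_salary_alt, altGo_eq]
  have h1 : PySem.List.slice hours none (some 5) = hours.take 5 := by
    have := PySem.List.slice_to (xs := hours) (b := 5) (by norm_num)
    simpa using this
  have h2 : PySem.List.slice hours (some 5) none = hours.drop 5 := by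
    have := PySem.List.slice_from (xs := hours) (a := 5) (by norm_num)
    simpa using this
  rw [h1, h2]
  ring
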